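-- pv_equiv track=rewrite | github.com/steerave/rental-tax-pipeline | src/taxauto/parsers/chase_credit.py | _collapse_doubled
-- ===== SOURCE A (Python) =====
-- from typing import List, Optional
--
-- def _collapse_doubled(token: str) -> str:
--     """Collapse consecutive same-letter pairs in a token, preserving punctuation.
--
--     ``AACCCCOOUUNNTT`` -> ``ACCOUNT``
--     ``(CCOONNTTIINNUUEEDD)`` -> ``(CONTINUED)``
--     Non-alphabetic characters are passed through untouched.
--     """
--     result: List[str] = []
--     i = 0
--     n = len(token)
--     while i < n:
--         if (
--             i + 1 < n
--             and token[i].isalpha()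
--             and token[i] == token[i + 1]
--         ):
--             result.append(token[i])
--             i += 2
--         else:
--             result.append(token[i])
--             i += 1
--     return "".join(result)
-- ===== SOURCE B (Python) =====
-- from itertools import groupby
--
--
-- def _collapse_doubled(token: str) -> str:
--     """Collapse consecutive same-letter pairs, preserving punctuation."""
--     parts = []
--     for ch, grp in groupby(token):
--         length = sum(1 for _ in grp)
--         parts.append(ch * (((length + 1) // 2) if ch.isalpha() else length))
--     return "".join(parts)
-- ===== Notes on version B (the rewrite author's own statement) =====
-- stated objective: idiomatic
-- what changed: Replaced the per-character index while-loop with itertools.groupby run-length grouping and a closed-form ceil(L/2) count per alphabetic run.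
import Mathlib
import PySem

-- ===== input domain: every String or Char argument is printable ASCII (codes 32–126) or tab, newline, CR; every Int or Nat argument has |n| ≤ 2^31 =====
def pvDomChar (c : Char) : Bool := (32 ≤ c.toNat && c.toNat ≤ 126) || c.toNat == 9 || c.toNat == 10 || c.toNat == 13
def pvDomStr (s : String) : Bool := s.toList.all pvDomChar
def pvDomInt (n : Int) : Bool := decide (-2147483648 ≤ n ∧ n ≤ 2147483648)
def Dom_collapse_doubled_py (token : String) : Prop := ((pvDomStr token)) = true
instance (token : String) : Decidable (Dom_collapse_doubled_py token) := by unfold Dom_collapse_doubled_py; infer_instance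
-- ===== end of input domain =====

-- B replaces A's index while-loop by run-length grouping (groupby) with a closed-form
-- ceil(L/2) count per alphabetic run; same result, more idiomatic.

-- ===== PORT A =====
-- A's while-loop over index i, transliterated as structural recursion on the char list:
-- the two-ahead branch is 'i+1 < n ∧ token[i].isalpha() ∧ token[i] == token[i+1]'.
def collapseLoopA : List Char → List Char
  | [] => []
  | [c] => [c]
  | c1 :: c2 :: rest =>
    if PySem.Chars.isalpha c1 && c1 == c2 then
      c1 :: collapseLoopA rest
    else
      c1 :: collapseLoopA (c2 :: rest)

def collapse_doubled_py (token : String) : String :=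
  String.ofList (collapseLoopA token.toList)

-- ===== PORT B =====
-- itertools.groupby: maximal runs of identical chars as (char, run length) pairs.
def pyGroupby : List Char → List (Char × Nat)
  | [] => []
  | c :: cs =>
    (c, (cs.takeWhile (· == c)).length + 1) :: pyGroupby (cs.dropWhile (· == c))
  termination_by l => l.length
  decreasing_by
    simp only [List.length_cons]
    exact Nat.lt_succ_of_le (List.length_dropWhile_le _ _)

def collapse_doubled_py_alt (token : String) : String :=
  String.ofList ((pyGroupby token.toList).flatMap fun p =>
    List.replicate (if PySem.Chars.isalpha p.1 then (p.2 + 1) / 2 else p.2) p.1)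

-- ===== PRECONDITION & SPEC =====
def Spec_collapse_doubled_py (token : String) (out : String) : Prop := out = collapse_doubled_py_alt token
instance (token : String) (out : String) : Decidable (Spec_collapse_doubled_py token out) := by unfold Spec_collapse_doubled_py; infer_instance

-- ===== CLAIM (what is proved, stated in full; the proofs are below) =====
def Claim_equal_collapse_doubled_py : Prop := ∀ (token : String), Dom_collapse_doubled_py token → Spec_collapse_doubled_py token (collapse_doubled_py token)

-- ===== LEMMAS AND PROOFS =====

lemma pyGroupby_cons (c : Char) (cs : List Char) :
    pyGroupby (c :: cs) =
      (c, (cs.takeWhile (· == c)).length + 1) :: pyGroupby (cs.dropWhile (· == c)) := by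
  rw [pyGroupby]

-- A's loop on a maximal run of c followed by a rest not starting with c.
lemma collapseLoopA_run (c : Char) (L : Nat) (rest : List Char)
    (hrest : ∀ d, rest.head? = some d → d ≠ c) :
    collapseLoopA (List.replicate L c ++ rest) =
      List.replicate (if PySem.Chars.isalpha c then (L + 1) / 2 else L) c ++ collapseLoopA rest := by
  induction L using Nat.strong_induction_on with
  | _ L ih =>
    match L with
    | 0 => simp
    | 1 =>
      cases hrest' : rest with
      | nil => simp [collapseLoopA]
      | cons d ds =>
        have hd : d ≠ c := hrest d (by simp [hrest'])
        have hdc : (c == d) = false := by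
          simp; exact fun h => hd h.symm
        simp [collapseLoopA, hdc]
    | (M + 2) =>
      by_cases ha : PySem.Chars.isalpha c = true
      · have : collapseLoopA (List.replicate (M + 2) c ++ rest)
            = c :: collapseLoopA (List.replicate M c ++ rest) := by
          simp [List.replicate_succ, collapseLoopA, ha]
        rw [this, ih M (by omega)]
        simp only [ha, if_true]
        have h2 : (M + 2 + 1) / 2 = (M + 1) / 2 + 1 := by omega
        rw [h2, List.replicate_succ]
        simp
      · have hf : PySem.Chars.isalpha c = false := by
          simpa using ha
        have : collapseLoopA (List.replicate (M + 2) c ++ rest)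
            = c :: collapseLoopA (List.replicate (M + 1) c ++ rest) := by
          simp [List.replicate_succ, collapseLoopA, hf]
        rw [this, ih (M + 1) (by omega)]
        simp [hf, List.replicate_succ]

lemma collapseLoopA_eq_alt (l : List Char) :
    collapseLoopA l = (pyGroupby l).flatMap fun p =>
      List.replicate (if PySem.Chars.isalpha p.1 then (p.2 + 1) / 2 else p.2) p.1 := by
  induction l using pyGroupby.induct with
  | case1 => rw [pyGroupby]; simp [collapseLoopA]
  | case2 c cs ih =>
    have hsplit : c :: cs =
        List.replicate ((cs.takeWhile (· == c)).length + 1) c ++ cs.dropWhile (· == c) := by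
      conv_lhs => rw [← List.takeWhile_append_dropWhile (p := (· == c)) (l := cs)]
      rw [List.replicate_succ]
      simp only [List.cons_append, List.cons.injEq, true_and, List.append_cancel_right_eq]
      exact (List.eq_replicate_length.mpr fun d hd => by
        have := List.mem_takeWhile_imp hd
        simpa using this)
    have hrest : ∀ d, (cs.dropWhile (· == c)).head? = some d → d ≠ c := by
      intro d hd h
      have := List.head?_dropWhile_not (p := (· == c)) (l := cs)
      rw [hd] at this
      simp [h] at this
    conv_lhs => rw [hsplit]
    rw [collapseLoopA_run c _ _ hrest, pyGroupby_cons]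
    simp only [List.flatMap_cons]
    rw [ih]

-- ===== VERDICT (by name: the statement is the Claim_ definition above) =====
theorem collapse_doubled_py_spec : Claim_equal_collapse_doubled_py := by
  intro token _
  unfold Spec_collapse_doubled_py collapse_doubled_py collapse_doubled_py_alt
  rw [collapseLoopA_eq_alt]
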